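-- pv_equiv track=rewrite | github.com/mguentner/aoc-2024 | aoc-08/main.py | find_coordinates
-- ===== SOURCE A (Python) =====
-- def find_coordinates(matrix):
--     res = {}
--     for y, row in enumerate(matrix):
--         for x, cell in enumerate(row):
--             if cell != '.':
--                 if cell in res:
--                     res[cell].append((y,x))
--                 else:
--                     res[cell] = [(y,x)]
--     return res
-- ===== SOURCE B (Python) =====
-- def find_coordinates(matrix):
--     flat = [(cell, (y, x))
--             for y, row in enumerate(matrix)
--             for x, cell in enumerate(row)
--             if cell != '.']
--     keys = dict.fromkeys(c for c, _ in flat)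
--     return {c: [p for k, p in flat if k == c] for c in keys}
-- ===== Notes on version B (the rewrite author's own statement) =====
-- stated objective: alternative
-- what changed: B first flattens the grid into a list of (char, coordinate) pairs, collects the distinct characters in first-occurrence order, and builds each group by filtering the flat list per key, instead of A's single-pass dict accumulation with per-cell membership tests.
import Mathlib
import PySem

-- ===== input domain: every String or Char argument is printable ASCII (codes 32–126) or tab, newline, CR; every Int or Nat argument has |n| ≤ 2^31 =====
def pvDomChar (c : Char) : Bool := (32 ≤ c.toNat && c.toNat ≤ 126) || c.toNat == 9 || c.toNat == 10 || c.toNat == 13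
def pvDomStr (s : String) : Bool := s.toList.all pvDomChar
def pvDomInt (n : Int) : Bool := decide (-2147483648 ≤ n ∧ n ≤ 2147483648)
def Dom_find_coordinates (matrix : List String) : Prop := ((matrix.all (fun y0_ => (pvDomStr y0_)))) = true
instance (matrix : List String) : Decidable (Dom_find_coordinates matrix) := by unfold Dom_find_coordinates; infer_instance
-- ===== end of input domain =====

-- B groups non-dot cell coordinates by character via flatten + dedup keys + per-key filter
-- instead of A's single-pass dict accumulation (objective: alternative decomposition).


-- ===== PORT A =====
def find_coordinates (matrix : List String) : List (String × List (Int × Int)) :=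
  ((PySem.List.enumerate matrix).foldl (fun res yrow =>
    (PySem.List.enumerate yrow.2.toList).foldl (fun res xc =>
      if xc.2 ≠ '.' then
        if res.contains (String.ofList [xc.2]) then
          PySem.Dict.modify res (String.ofList [xc.2]) [] (fun l => l ++ [(yrow.1, xc.1)])
        else
          PySem.Dict.insert res (String.ofList [xc.2]) [(yrow.1, xc.1)]
      else res) res)
    (PySem.Dict.mk ([] : List (String × List (Int × Int))))).items

-- ===== PORT B =====
def find_coordinates_alt (matrix : List String) : List (String × List (Int × Int)) :=
  let flat := (PySem.List.enumerate matrix).flatMap (fun yrow =>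
    (PySem.List.enumerate yrow.2.toList).filterMap (fun xc =>
      if xc.2 ≠ '.' then some (String.ofList [xc.2], (yrow.1, xc.1)) else none))
  let keys := PySem.List.dedup (flat.map Prod.fst)
  keys.map (fun c => (c, (flat.filter (fun kp => kp.1 == c)).map Prod.snd))

-- ===== PRECONDITION & SPEC =====
def Spec_find_coordinates (matrix : List String) (out : List (String × List (Int × Int))) : Prop := out = find_coordinates_alt matrix
instance (matrix : List String) (out : List (String × List (Int × Int))) : Decidable (Spec_find_coordinates matrix out) := by unfold Spec_find_coordinates; infer_instance

-- ===== CLAIM (what is proved, stated in full; the proofs are below) =====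
def Claim_equal_find_coordinates : Prop := ∀ (matrix : List String), Dom_find_coordinates matrix → Spec_find_coordinates matrix (find_coordinates matrix)

-- ===== LEMMAS AND PROOFS =====

-- folding a guarded step = folding the step over the filterMap
theorem pv_foldl_if_filterMap {α β γ : Type} (p : α → Prop) [DecidablePred p]
    (g : α → β) (f : γ → β → γ) :
    ∀ (xs : List α) (r : γ),
      xs.foldl (fun r x => if p x then f r (g x) else r) r
        = (xs.filterMap (fun x => if p x then some (g x) else none)).foldl f r := by
  intro xs
  induction xs with
  | nil => intro r; rfl
  | cons x t ih =>
    intro r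
    by_cases h : p x <;> simp [h, ih]

-- nested fold over a list of lists = fold over the flatMap
theorem pv_foldl_flatMap {σ β γ : Type} (g : σ → List β) (f : γ → β → γ) :
    ∀ (l : List σ) (r : γ),
      l.foldl (fun r s => (g s).foldl f r) r = (l.flatMap g).foldl f r := by
  intro l
  induction l with
  | nil => intro r; rfl
  | cons s t ih => intro r; simp [List.flatMap_cons, List.foldl_append, ih]

def pvStep (res : PySem.Dict String (List (Int × Int))) (kp : String × (Int × Int)) :
    PySem.Dict String (List (Int × Int)) :=
  if res.contains kp.1 then PySem.Dict.modify res kp.1 [] (fun l => l ++ [kp.2])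
  else PySem.Dict.insert res kp.1 [kp.2]

def pvGrp (ps : List (String × (Int × Int))) : List (String × List (Int × Int)) :=
  (PySem.List.dedup (ps.map Prod.fst)).map
    (fun c => (c, (ps.filter (fun kp => kp.1 == c)).map Prod.snd))

theorem pv_find_map_of_mem (F : String → List (Int × Int)) :
    ∀ (ks : List String) (c : String), c ∈ ks →
      List.find? (fun p => p.1 == c) (ks.map (fun k => (k, F k))) = some (c, F c) := by
  intro ks
  induction ks with
  | nil => intro c h; cases h
  | cons k t ih =>
    intro c h
    by_cases hk : k = c
    · subst hk; simp
    · have : c ∈ t := by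
        rcases List.mem_cons.mp h with h1 | h1
        · exact absurd h1.symm hk
        · exact h1
      simp [hk, ih c this]

theorem pv_dedup_append_mem {l : List String} {c : String} (h : c ∈ l) :
    PySem.List.dedup (l ++ [c]) = PySem.List.dedup l := by
  simp only [PySem.List.dedup, PySem.Set.ofList, List.foldl_append, List.foldl_cons, List.foldl_nil]
  rw [PySem.Set.add, if_pos]
  show List.contains _ _ = true
  exact List.elem_eq_true_of_mem ((PySem.Set.mem_ofList l c).mpr h)

theorem pv_dedup_append_not_mem {l : List String} {c : String} (h : c ∉ l) :
    PySem.List.dedup (l ++ [c]) = PySem.List.dedup l ++ [c] := by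
  simp only [PySem.List.dedup, PySem.Set.ofList, List.foldl_append, List.foldl_cons, List.foldl_nil]
  rw [PySem.Set.add, if_neg]
  show ¬ List.contains _ _ = true
  rw [List.contains_iff_mem]
  exact fun hm => h ((PySem.Set.mem_ofList l c).mp hm)

theorem pv_contains_grp_pos {qs : List (String × (Int × Int))} {c : String}
    (hc : c ∈ qs.map Prod.fst) : (PySem.Dict.mk (pvGrp qs)).contains c = true := by
  simp only [PySem.Dict.contains, pvGrp, List.any_map, Function.comp_def, List.any_eq_true]
  exact ⟨c, (PySem.List.mem_dedup _ _).mpr hc, by simp⟩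

theorem pv_contains_grp_neg {qs : List (String × (Int × Int))} {c : String}
    (hc : c ∉ qs.map Prod.fst) : (PySem.Dict.mk (pvGrp qs)).contains c = false := by
  simp only [PySem.Dict.contains, pvGrp, List.any_map, Function.comp_def, List.any_eq_false]
  intro k hk
  simp only [beq_iff_eq]
  intro he; subst he
  exact hc ((PySem.List.mem_dedup _ _).mp hk)

theorem pv_step_grp (qs : List (String × (Int × Int))) (cp : String × (Int × Int)) :
    pvStep (PySem.Dict.mk (pvGrp qs)) cp = PySem.Dict.mk (pvGrp (qs ++ [cp])) := by
  obtain ⟨c, p⟩ := cp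
  by_cases hc : c ∈ qs.map Prod.fst
  · -- key already present
    have hcon : (PySem.Dict.mk (pvGrp qs)).contains c = true := pv_contains_grp_pos hc
    rw [pvStep, if_pos hcon, PySem.Dict.modify, PySem.Dict.insert, if_pos hcon]
    rw [PySem.Dict.getD, PySem.Dict.get?]
    simp only [pvGrp]
    rw [pv_find_map_of_mem _ _ c ((PySem.List.mem_dedup _ _).mpr hc)]
    simp only [Option.map_some, Option.getD_some]
    congr 1
    rw [show (qs ++ [(c, p)]).map Prod.fst = qs.map Prod.fst ++ [c] by simp]
    rw [pv_dedup_append_mem hc, List.map_map]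
    apply List.map_congr_left
    intro k hk
    simp only [Function.comp_def]
    by_cases hkc : k = c
    · subst hkc
      simp [List.filter_append]
    · simp [hkc, List.filter_append, Ne.symm hkc]
  · -- new key
    have hcon : (PySem.Dict.mk (pvGrp qs)).contains c = false := pv_contains_grp_neg hc
    rw [pvStep, if_neg (by simp [hcon]), PySem.Dict.insert, if_neg (by simp [hcon])]
    congr 1
    simp only [pvGrp]
    rw [show (qs ++ [(c, p)]).map Prod.fst = qs.map Prod.fst ++ [c] by simp]
    rw [pv_dedup_append_not_mem hc, List.map_append]
    congr 1
    · apply List.map_congr_left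
      intro k hk
      have hkc : k ≠ c := by
        intro he; subst he; exact hc ((PySem.Set.mem_ofList _ _).mp hk)
      simp [List.filter_append, Ne.symm hkc]
    · have hfil : qs.filter (fun kp => kp.1 == c) = [] := by
        rw [List.filter_eq_nil_iff]
        intro kp hkp
        simp only [beq_iff_eq]
        intro he
        exact hc (List.mem_map.mpr ⟨kp, hkp, he⟩)
      simp [List.filter_append, hfil]

theorem pv_foldl_grp :
    ∀ (ps qs : List (String × (Int × Int))),
      ps.foldl pvStep (PySem.Dict.mk (pvGrp qs)) = PySem.Dict.mk (pvGrp (qs ++ ps)) := by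
  intro ps
  induction ps with
  | nil => intro qs; simp
  | cons cp t ih =>
    intro qs
    simp only [List.foldl_cons, pv_step_grp qs cp, ih (qs ++ [cp]), List.append_assoc,
      List.singleton_append]

-- ===== VERDICT (by name: the statement is the Claim_ definition above) =====
theorem find_coordinates_spec : Claim_equal_find_coordinates := by
  intro matrix _
  show find_coordinates matrix = find_coordinates_alt matrix
  unfold find_coordinates find_coordinates_alt
  have h1 : ∀ (yrow : Int × String) (res : PySem.Dict String (List (Int × Int))),
      (PySem.List.enumerate yrow.2.toList).foldl (fun res xc =>
        if xc.2 ≠ '.' then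
          if res.contains (String.ofList [xc.2]) then
            PySem.Dict.modify res (String.ofList [xc.2]) [] (fun l => l ++ [(yrow.1, xc.1)])
          else
            PySem.Dict.insert res (String.ofList [xc.2]) [(yrow.1, xc.1)]
        else res) res
      = ((PySem.List.enumerate yrow.2.toList).filterMap (fun xc =>
          if xc.2 ≠ '.' then some (String.ofList [xc.2], (yrow.1, xc.1)) else none)).foldl pvStep res :=
    fun yrow res =>
      pv_foldl_if_filterMap (fun xc : Int × Char => xc.2 ≠ '.')
        (fun xc => (String.ofList [xc.2], (yrow.1, xc.1))) pvStep _ res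
  have h2 : (fun (res : PySem.Dict String (List (Int × Int))) (yrow : Int × String) =>
      (PySem.List.enumerate yrow.2.toList).foldl (fun res xc =>
        if xc.2 ≠ '.' then
          if res.contains (String.ofList [xc.2]) then
            PySem.Dict.modify res (String.ofList [xc.2]) [] (fun l => l ++ [(yrow.1, xc.1)])
          else
            PySem.Dict.insert res (String.ofList [xc.2]) [(yrow.1, xc.1)]
        else res) res)
      = (fun res yrow => ((PySem.List.enumerate yrow.2.toList).filterMap (fun xc =>
          if xc.2 ≠ '.' then some (String.ofList [xc.2], (yrow.1, xc.1)) else none)).foldl pvStep res) :=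
    funext fun res => funext fun yrow => h1 yrow res
  rw [h2, pv_foldl_flatMap, show (PySem.Dict.mk ([] : List (String × List (Int × Int))))
      = PySem.Dict.mk (pvGrp []) from rfl, pv_foldl_grp, List.nil_append]
  rfl
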